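-- pv_equiv track=rewrite | github.com/nasaharvest/glam-api | glam_api/glam/utils.py | get_product_id_from_filename
-- ===== SOURCE A (Python) =====
-- def get_product_id_from_filename(filename):
--     """
--     Matches a filename to its corresponding ID from a given list.
--
--     Args:
--       filename: The name of the file.
--
--     Returns:
--       The matching ID if found, otherwise None.
--     """
--
--     filename = filename.lower()
--
--     if "chirps" in filename:
--         return "chirps-precip"
--     elif "swi" in filename:
--         return "copernicus-swi"
--     elif any(text in filename for text in ["dfppm_4wk", "dfppm-4wk"]):
--         return "servir-4wk-esi"
--     elif any(text in filename for text in ["dfppm_12wk", "dfppm-12wk"]):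
--         return "servir-12wk-esi"
--     elif any(text in filename for text in ["vnp09h1.ndvi", "vnp09h1-ndvi"]):
--         return "vnp09h1-ndvi"
--     elif any(text in filename for text in ["mod09q1.ndvi", "mod09q1-ndvi"]):
--         return "mod09q1-ndvi"
--     elif any(text in filename for text in ["myd09q1.ndvi", "myd09q1-ndvi"]):
--         return "myd09q1-ndvi"
--     elif any(text in filename for text in ["mod13q1.ndvi", "mod13q1-ndvi"]):
--         return "mod13q1-ndvi"
--     elif any(text in filename for text in ["myd13q1.ndvi", "myd13q1-ndvi"]):
--         return "myd13q1-ndvi"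
--     elif any(text in filename for text in ["mod09a1.ndwi", "mod09a1-ndwi"]):
--         return "mod09a1-ndwi"
--     else:
--         return None
-- ===== SOURCE B (Python) =====
-- # Naive multi-pattern scanner: walk the filename once, at each position test all
-- # anchored patterns and keep the minimum-priority rule matched anywhere.
-- _RULES = [
--     ("chirps", 0), ("swi", 1),
--     ("dfppm_4wk", 2), ("dfppm-4wk", 2),
--     ("dfppm_12wk", 3), ("dfppm-12wk", 3),
--     ("vnp09h1.ndvi", 4), ("vnp09h1-ndvi", 4),
--     ("mod09q1.ndvi", 5), ("mod09q1-ndvi", 5),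
--     ("myd09q1.ndvi", 6), ("myd09q1-ndvi", 6),
--     ("mod13q1.ndvi", 7), ("mod13q1-ndvi", 7),
--     ("myd13q1.ndvi", 8), ("myd13q1-ndvi", 8),
--     ("mod09a1.ndwi", 9), ("mod09a1-ndwi", 9),
-- ]
-- _IDS = [
--     "chirps-precip", "copernicus-swi", "servir-4wk-esi", "servir-12wk-esi",
--     "vnp09h1-ndvi", "mod09q1-ndvi", "myd09q1-ndvi", "mod13q1-ndvi",
--     "myd13q1-ndvi", "mod09a1-ndwi",
-- ]
--
--
-- def get_product_id_from_filename(filename):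
--     f = filename.lower()
--     best = None
--     for i in range(len(f)):
--         for pat, prio in _RULES:
--             if (best is None or prio < best) and f.startswith(pat, i):
--                 best = prio
--     return _IDS[best] if best is not None else None
-- ===== Notes on version B (the rewrite author's own statement) =====
-- stated objective: alternative
-- what changed: Replaces the if/elif chain of per-pattern substring searches with a single left-to-right scan over filename positions that tests all anchored patterns at each position and accumulates the minimum-priority matched rule.
import Mathlib
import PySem

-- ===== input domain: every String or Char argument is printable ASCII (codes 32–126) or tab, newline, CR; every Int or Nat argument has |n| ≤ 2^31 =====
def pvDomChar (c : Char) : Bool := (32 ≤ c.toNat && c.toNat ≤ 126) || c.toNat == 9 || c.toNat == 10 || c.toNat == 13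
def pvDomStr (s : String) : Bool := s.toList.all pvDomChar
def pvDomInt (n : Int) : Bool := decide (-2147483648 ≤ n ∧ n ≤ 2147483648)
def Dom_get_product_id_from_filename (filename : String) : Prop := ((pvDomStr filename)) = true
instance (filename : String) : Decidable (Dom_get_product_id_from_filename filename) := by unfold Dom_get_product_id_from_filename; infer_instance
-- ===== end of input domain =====

-- B replaces A's if/elif substring-search chain by a single scan over filename positions that
-- keeps the minimum-priority anchored rule matched anywhere (alternative algorithm, same cost).

-- ===== PORT A =====
def get_product_id_from_filename (filename : String) : Option String :=
  let f := PySem.Str.lower filename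
  if PySem.Str.isIn "chirps" f then some "chirps-precip"
  else if PySem.Str.isIn "swi" f then some "copernicus-swi"
  else if PySem.Str.isIn "dfppm_4wk" f || PySem.Str.isIn "dfppm-4wk" f then some "servir-4wk-esi"
  else if PySem.Str.isIn "dfppm_12wk" f || PySem.Str.isIn "dfppm-12wk" f then some "servir-12wk-esi"
  else if PySem.Str.isIn "vnp09h1.ndvi" f || PySem.Str.isIn "vnp09h1-ndvi" f then some "vnp09h1-ndvi"
  else if PySem.Str.isIn "mod09q1.ndvi" f || PySem.Str.isIn "mod09q1-ndvi" f then some "mod09q1-ndvi"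
  else if PySem.Str.isIn "myd09q1.ndvi" f || PySem.Str.isIn "myd09q1-ndvi" f then some "myd09q1-ndvi"
  else if PySem.Str.isIn "mod13q1.ndvi" f || PySem.Str.isIn "mod13q1-ndvi" f then some "mod13q1-ndvi"
  else if PySem.Str.isIn "myd13q1.ndvi" f || PySem.Str.isIn "myd13q1-ndvi" f then some "myd13q1-ndvi"
  else if PySem.Str.isIn "mod09a1.ndwi" f || PySem.Str.isIn "mod09a1-ndwi" f then some "mod09a1-ndwi"
  else none

-- ===== PORT B =====
-- _RULES: ordered (pattern, priority) table of Source B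
def pvRules : List (List Char × Nat) :=
  [ ("chirps".toList, 0), ("swi".toList, 1)
  , ("dfppm_4wk".toList, 2), ("dfppm-4wk".toList, 2)
  , ("dfppm_12wk".toList, 3), ("dfppm-12wk".toList, 3)
  , ("vnp09h1.ndvi".toList, 4), ("vnp09h1-ndvi".toList, 4)
  , ("mod09q1.ndvi".toList, 5), ("mod09q1-ndvi".toList, 5)
  , ("myd09q1.ndvi".toList, 6), ("myd09q1-ndvi".toList, 6)
  , ("mod13q1.ndvi".toList, 7), ("mod13q1-ndvi".toList, 7)
  , ("myd13q1.ndvi".toList, 8), ("myd13q1-ndvi".toList, 8)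
  , ("mod09a1.ndwi".toList, 9), ("mod09a1-ndwi".toList, 9) ]

-- _IDS: priority → product id
def pvIds : List String :=
  [ "chirps-precip", "copernicus-swi", "servir-4wk-esi", "servir-12wk-esi"
  , "vnp09h1-ndvi", "mod09q1-ndvi", "myd09q1-ndvi", "mod13q1-ndvi"
  , "myd13q1-ndvi", "mod09a1-ndwi" ]

-- inner loop body: `if (best is None or prio < best) and f.startswith(pat, i): best = prio`
def pvRuleStep (suf : List Char) (best : Option Nat) (r : List Char × Nat) : Option Nat :=
  if (match best with | none => true | some m => decide (r.2 < m)) && PySem.Chars.startswith suf r.1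
  then some r.2 else best

-- outer loop `for i in range(len(f))`: recursion over the suffixes f[i:] of the lowered filename
def pvScan : List Char → Option Nat → Option Nat
  | [], best => best
  | c :: t, best => pvScan t (pvRules.foldl (pvRuleStep (c :: t)) best)

def get_product_id_from_filename_alt (filename : String) : Option String :=
  let f := PySem.Str.lower filename
  match pvScan f.toList none with
  | none => none
  | some k => PySem.List.pyGet? pvIds (Int.ofNat k)  -- _IDS[best]; k < 10 always, so in range

-- ===== PRECONDITION & SPEC =====
def Spec_get_product_id_from_filename (filename : String) (out : Option String) : Prop := out = get_product_id_from_filename_alt filename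
instance (filename : String) (out : Option String) : Decidable (Spec_get_product_id_from_filename filename out) := by unfold Spec_get_product_id_from_filename; infer_instance

-- ===== CLAIM (what is proved, stated in full; the proofs are below) =====
def Claim_equal_get_product_id_from_filename : Prop := ∀ (filename : String), Dom_get_product_id_from_filename filename → Spec_get_product_id_from_filename filename (get_product_id_from_filename filename)

-- ===== LEMMAS AND PROOFS =====

-- minimum on Option Nat (none = nothing matched yet)
def omin : Option Nat → Option Nat → Option Nat
  | none, b => b
  | some a, none => some a
  | some a, some b => some (min a b)

theorem omin_none_right (a : Option Nat) : omin a none = a := by cases a <;> rfl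

theorem omin_assoc (a b c : Option Nat) : omin (omin a b) c = omin a (omin b c) := by
  cases a <;> cases b <;> cases c <;> simp [omin, Nat.min_assoc]

-- min priority among rules whose pattern is a prefix of `suf`
def pvMM (suf : List Char) (rs : List (List Char × Nat)) : Option Nat :=
  rs.foldr (fun r a => omin (if PySem.Chars.startswith suf r.1 then some r.2 else none) a) none

-- min priority among rules whose pattern occurs anywhere in `l`
def pvGM (l : List Char) (rs : List (List Char × Nat)) : Option Nat :=
  rs.foldr (fun r a => omin (if PySem.Chars.isIn r.1 l then some r.2 else none) a) none

theorem pvRuleStep_eq (suf : List Char) (b : Option Nat) (r : List Char × Nat) :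
    pvRuleStep suf b r = omin b (if PySem.Chars.startswith suf r.1 then some r.2 else none) := by
  unfold pvRuleStep
  cases b with
  | none =>
      cases h : PySem.Chars.startswith suf r.1 <;> simp [omin, h]
  | some m =>
      cases h : PySem.Chars.startswith suf r.1 <;> simp [omin, h]
      by_cases hm : r.2 < m <;> simp [hm] <;> omega

theorem foldl_ruleStep (suf : List Char) (rs : List (List Char × Nat)) (b : Option Nat) :
    rs.foldl (pvRuleStep suf) b = omin b (pvMM suf rs) := by
  induction rs generalizing b with
  | nil => simp [pvMM, omin_none_right]
  | cons r rs ih =>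
      simp only [List.foldl_cons, pvMM, List.foldr_cons]
      rw [ih, pvRuleStep_eq, omin_assoc]; rfl

theorem isIn_cons (p : List Char) (c : Char) (t : List Char) :
    PySem.Chars.isIn p (c :: t) = (PySem.Chars.startswith (c :: t) p || PySem.Chars.isIn p t) := by
  rw [Bool.eq_iff_iff]
  simp only [Bool.or_eq_true, PySem.Chars.isIn_iff_infix, PySem.Chars.startswith_iff]
  exact List.infix_cons_iff

theorem omin_shuffle (x M y G : Option Nat) :
    omin (omin x M) (omin y G) = omin x (omin y (omin M G)) := by
  cases x <;> cases M <;> cases y <;> cases G <;> simp only [omin, Option.some.injEq] <;> omega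

theorem omin_if_if (a b : Bool) (p : Nat) (X : Option Nat) :
    omin (if a then some p else none) (omin (if b then some p else none) X) =
      omin (if (a || b) then some p else none) X := by
  cases a <;> cases b <;> cases X <;> simp [omin, ← Nat.min_assoc]

theorem mm_gm_cons (c : Char) (t : List Char) (rs : List (List Char × Nat)) :
    omin (pvMM (c :: t) rs) (pvGM t rs) = pvGM (c :: t) rs := by
  induction rs with
  | nil => rfl
  | cons r rs ih =>
      simp only [pvMM, pvGM, List.foldr_cons, isIn_cons] at *
      rw [← omin_if_if, ← ih]
      exact omin_shuffle _ _ _ _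

theorem scan_eq (l : List Char) (b : Option Nat) : pvScan l b = omin b (pvGM l pvRules) := by
  induction l generalizing b with
  | nil =>
      have : pvGM [] pvRules = none := by decide
      simp [pvScan, this, omin_none_right]
  | cons c t ih =>
      rw [pvScan, foldl_ruleStep, ih, omin_assoc, mm_gm_cons]

theorem chain10 (c0 c1 c2 c3 c4 c5 c6 c7 c8 c9 : Bool) :
    (if c0 then some "chirps-precip"
     else if c1 then some "copernicus-swi"
     else if c2 then some "servir-4wk-esi"
     else if c3 then some "servir-12wk-esi"
     else if c4 then some "vnp09h1-ndvi"
     else if c5 then some "mod09q1-ndvi"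
     else if c6 then some "myd09q1-ndvi"
     else if c7 then some "mod13q1-ndvi"
     else if c8 then some "myd13q1-ndvi"
     else if c9 then some "mod09a1-ndwi"
     else none)
    = (match omin (if c0 then some 0 else none) (omin (if c1 then some 1 else none)
         (omin (if c2 then some 2 else none) (omin (if c3 then some 3 else none)
         (omin (if c4 then some 4 else none) (omin (if c5 then some 5 else none)
         (omin (if c6 then some 6 else none) (omin (if c7 then some 7 else none)
         (omin (if c8 then some 8 else none) (omin (if c9 then some 9 else none) none))))))))) with
       | none => (none : Option String)
       | some k => PySem.List.pyGet? pvIds (Int.ofNat k)) := by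
  cases c0 <;> cases c1 <;> cases c2 <;> cases c3 <;> cases c4 <;>
    cases c5 <;> cases c6 <;> cases c7 <;> cases c8 <;> cases c9 <;> rfl

-- ===== VERDICT (by name: the statement is the Claim_ definition above) =====
theorem pvGM_rules (l : List Char) : pvGM l pvRules =
    omin (if PySem.Chars.isIn "chirps".toList l then some 0 else none)
    (omin (if PySem.Chars.isIn "swi".toList l then some 1 else none)
    (omin (if (PySem.Chars.isIn "dfppm_4wk".toList l || PySem.Chars.isIn "dfppm-4wk".toList l) then some 2 else none)
    (omin (if (PySem.Chars.isIn "dfppm_12wk".toList l || PySem.Chars.isIn "dfppm-12wk".toList l) then some 3 else none)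
    (omin (if (PySem.Chars.isIn "vnp09h1.ndvi".toList l || PySem.Chars.isIn "vnp09h1-ndvi".toList l) then some 4 else none)
    (omin (if (PySem.Chars.isIn "mod09q1.ndvi".toList l || PySem.Chars.isIn "mod09q1-ndvi".toList l) then some 5 else none)
    (omin (if (PySem.Chars.isIn "myd09q1.ndvi".toList l || PySem.Chars.isIn "myd09q1-ndvi".toList l) then some 6 else none)
    (omin (if (PySem.Chars.isIn "mod13q1.ndvi".toList l || PySem.Chars.isIn "mod13q1-ndvi".toList l) then some 7 else none)
    (omin (if (PySem.Chars.isIn "myd13q1.ndvi".toList l || PySem.Chars.isIn "myd13q1-ndvi".toList l) then some 8 else none)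
    (omin (if (PySem.Chars.isIn "mod09a1.ndwi".toList l || PySem.Chars.isIn "mod09a1-ndwi".toList l) then some 9 else none)
     none))))))))) := by
  simp only [pvGM, pvRules, List.foldr_cons, List.foldr_nil]
  simp only [omin_if_if]

theorem get_product_id_from_filename_spec : Claim_equal_get_product_id_from_filename := by
  intro filename _
  unfold Spec_get_product_id_from_filename
  unfold get_product_id_from_filename get_product_id_from_filename_alt
  dsimp only
  rw [scan_eq]
  rw [show ∀ X : Option Nat, omin none X = X from fun _ => rfl]
  rw [pvGM_rules]
  simp only [PySem.Str.isIn_eq]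
  exact chain10 _ _ _ _ _ _ _ _ _ _
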